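-- pv_equiv track=rewrite | github.com/Zaanis/DSC20 | hw02.py | smaller_collection
-- ===== SOURCE A (Python) =====
-- def smaller_collection(collections):
--     """
--     ##############################################################
--     takes in a dictionary and returns a list of unique items in
--     the values of the dictionary
--     ##############################################################
--
--     >>> exploration1 = {'team1': ['blue dartwing', 'elves ear'], \
--     'team2': ['hawk beak', 'histcarp']}
--     >>> out = set(smaller_collection(exploration1))
--     >>> set(['blue dartwing', 'elves ear', 'hawk beak', 'histcarp']) == out
--     True
--     >>> exploration2 = {'team1': ['deathbell', 'deathbell'], 'team2': []}
--     >>> smaller_collection(exploration2)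
--     ['deathbell']
--     >>> exploration3 = {'team1': ['deathbell'], \
--     'team2': ['blue dartwing', 'histcarp'], 'team3': ['histcarp']}
--     >>> out = set(smaller_collection(exploration3))
--     >>> out == set(['deathbell', 'blue dartwing', 'histcarp'])
--     True
--
--     # Add at least 3 doctests below here #
--     >>> exploration4 = {'team1': ['a'], 'team2': ['a'], 'team3': ['a']}
--     >>> smaller_collection(exploration4)
--     ['a']
--     >>> exploration5 = {'team1': [], 'team2': []}
--     >>> smaller_collection(exploration5)
--     []
--     >>> exploration6 = {'team1': ['a'], 'team2': ['a', 'b'], 'team3': \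
-- ['a', 'b', 'c']}
--     >>> smaller_collection(exploration6)
--     ['a', 'b', 'c']
--     """
--     all_list = []
--     for keys in collections:
--         all_items = collections.get(keys)
--         for items in all_items:
--             if items in all_list:
--                 all_list = all_list
--             else:
--                 all_list.append(items)
--     return all_list
-- ===== SOURCE B (Python) =====
-- def smaller_collection(collections):
--     rest = [item for value in collections.values() for item in value]
--     result = []
--     while rest:
--         head = rest[0]
--         result.append(head)
--         rest = [item for item in rest if item != head]
--     return result
-- ===== Notes on version B (the rewrite author's own statement) =====
-- stated objective: alternative
-- what changed: Instead of one pass that membership-tests each item against a growing seen-list, B flattens the values into a worklist and repeatedly emits its first element and filters all its duplicates out of the worklist (nub-by-filtering).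
import Mathlib
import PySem

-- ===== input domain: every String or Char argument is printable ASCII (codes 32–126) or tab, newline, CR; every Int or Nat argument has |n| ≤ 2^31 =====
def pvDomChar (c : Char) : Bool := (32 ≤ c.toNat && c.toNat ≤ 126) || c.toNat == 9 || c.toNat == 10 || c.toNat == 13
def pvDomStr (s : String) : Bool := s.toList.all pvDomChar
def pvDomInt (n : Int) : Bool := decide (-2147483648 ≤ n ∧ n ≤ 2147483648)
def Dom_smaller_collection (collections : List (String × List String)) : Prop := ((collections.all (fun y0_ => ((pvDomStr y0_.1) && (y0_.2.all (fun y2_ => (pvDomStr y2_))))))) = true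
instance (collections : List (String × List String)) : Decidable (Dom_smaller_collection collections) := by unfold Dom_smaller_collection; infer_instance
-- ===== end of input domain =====

-- B replaces A's seen-list membership scan by a worklist that repeatedly emits its
-- first element and filters out that element's duplicates; objective: alternative.

-- ===== PORT A =====
def smaller_collection (collections : List (String × List String)) : List String :=
  let d := PySem.Dict.ofList collections
  d.keys.foldl
    (fun all_list keys =>
      let all_items := d.getD keys []
      all_items.foldl
        (fun al items => if al.contains items then al else al ++ [items])
        all_list)
    []

-- ===== PORT B =====
-- the while-loop of Source B: emit rest[0], filter it out of rest, repeat until rest is empty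
def pvWhile (rest : List String) (result : List String) : List String :=
  match rest with
  | [] => result
  | head :: t =>
      pvWhile ((head :: t).filter (fun item => item ≠ head)) (result ++ [head])
termination_by rest.length
decreasing_by
  simp only [List.filter_cons, decide_not]
  simp
  exact List.length_filter_le _ _

def smaller_collection_alt (collections : List (String × List String)) : List String :=
  pvWhile ((PySem.Dict.ofList collections).values.flatten) []

-- ===== PRECONDITION & SPEC =====
def Spec_smaller_collection (collections : List (String × List String)) (out : List String) : Prop := out = smaller_collection_alt collections
instance (collections : List (String × List String)) (out : List String) : Decidable (Spec_smaller_collection collections out) := by unfold Spec_smaller_collection; infer_instance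

-- ===== CLAIM (what is proved, stated in full; the proofs are below) =====
def Claim_equal_smaller_collection : Prop := ∀ (collections : List (String × List String)), Dom_smaller_collection collections → Spec_smaller_collection collections (smaller_collection collections)

-- ===== LEMMAS AND PROOFS =====

-- folding Set.add over a flatten is the double fold over the list of lists
theorem pv_foldl_add_flatten {α : Type} [BEq α] (ls : List (List α)) (acc : PySem.Set α) :
    ls.foldl (fun s v => v.foldl PySem.Set.add s) acc = ls.flatten.foldl PySem.Set.add acc := by
  induction ls generalizing acc with
  | nil => rfl
  | cons v rest ih => simp [List.flatten_cons, List.foldl_append, ih]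

-- if x is already in the accumulator, occurrences of x in the input are no-ops for Set.add
theorem pv_foldl_add_filter (x : String) (t : List String) (acc : List String)
    (hx : acc.contains x = true) :
    t.foldl PySem.Set.add acc = (t.filter (fun y => y ≠ x)).foldl PySem.Set.add acc := by
  induction t generalizing acc with
  | nil => rfl
  | cons a t ih =>
    by_cases hax : a = x
    · subst hax
      have : PySem.Set.add acc a = acc := by
        simp only [PySem.Set.add, PySem.Set.contains]
        simp only [List.contains_eq_mem] at hx ⊢
        simp [hx]
      simp [List.foldl_cons, this, ih acc hx]
    · have h2 : (PySem.Set.add acc a).contains x = true := by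
        simp [PySem.Set.add]; split <;> simp_all
      simp [hax, List.foldl_cons, ih _ h2]

-- if x never occurs in ys, a leading x in the accumulator passes straight through the fold
theorem pv_foldl_add_cons (x : String) (ys : List String) (acc : List String)
    (hys : ∀ y ∈ ys, y ≠ x) :
    ys.foldl PySem.Set.add (x :: acc) = x :: ys.foldl PySem.Set.add acc := by
  induction ys generalizing acc with
  | nil => rfl
  | cons a ys ih =>
    have hax : a ≠ x := hys a (by simp)
    have : PySem.Set.add (x :: acc) a = x :: PySem.Set.add acc a := by
      simp [PySem.Set.add, hax]
      split <;> simp_all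
    simp only [List.foldl_cons, this]
    exact ih _ (fun y hy => hys y (by simp [hy]))

-- first-occurrence dedup unfolds as: head, then dedup of the tail with the head filtered out
theorem pv_ofList_cons_filter (h : String) (t : List String) :
    PySem.Set.ofList (h :: t) = h :: PySem.Set.ofList (t.filter (fun y => y ≠ h)) := by
  have h1 : PySem.Set.ofList (h :: t) = t.foldl PySem.Set.add [h] := by
    simp [PySem.Set.ofList_eq_foldl, PySem.Set.add]
  rw [h1, pv_foldl_add_filter h t [h] (by simp),
      pv_foldl_add_cons h _ [] (by
        intro y hy
        have := (List.mem_filter.mp hy).2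
        simpa using this)]
  simp [PySem.Set.ofList_eq_foldl]

-- the worklist loop computes result ++ first-occurrence dedup of the worklist
theorem pvWhile_eq (rest result : List String) :
    pvWhile rest result = result ++ PySem.Set.ofList rest := by
  induction hn : rest.length using Nat.strong_induction_on generalizing rest result with
  | _ n ih =>
    match rest with
    | [] => simp [pvWhile, PySem.Set.ofList_eq_foldl]
    | head :: t =>
      rw [pvWhile]
      have hlt : ((head :: t).filter (fun item => item ≠ head)).length < n := by
        subst hn
        simp only [List.filter_cons]
        simp
        exact List.length_filter_le _ _
      rw [ih _ hlt _ _ rfl, pv_ofList_cons_filter]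
      simp

-- ===== VERDICT (by name: the statement is the Claim_ definition above) =====
theorem smaller_collection_spec : Claim_equal_smaller_collection := by
  intro collections _
  show smaller_collection collections = smaller_collection_alt collections
  unfold smaller_collection smaller_collection_alt
  set d := PySem.Dict.ofList collections with hd
  have hnd : d.keys.Nodup := PySem.Dict.nodup_keys_ofList collections
  have hv : d.values = d.keys.map (fun k => d.getD k []) :=
    PySem.Dict.values_eq_map_keys d hnd []
  calc d.keys.foldl
        (fun all_list k =>
          (d.getD k []).foldl (fun al it => if al.contains it then al else al ++ [it]) all_list)
        []
      = d.keys.foldl (fun acc k => (d.getD k []).foldl PySem.Set.add acc) [] := rfl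
    _ = (d.keys.map (fun k => d.getD k [])).foldl (fun s v => v.foldl PySem.Set.add s) [] := by
        rw [List.foldl_map]
    _ = d.values.foldl (fun s v => v.foldl PySem.Set.add s) [] := by rw [hv]
    _ = d.values.flatten.foldl PySem.Set.add [] := pv_foldl_add_flatten _ _
    _ = PySem.Set.ofList d.values.flatten := by rw [PySem.Set.ofList_eq_foldl]
    _ = pvWhile d.values.flatten [] := by rw [pvWhile_eq, List.nil_append]
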